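-- pv_equiv track=rewrite | github.com/Ithrendrial/elevator-simulator | scripts/plot_hall_call_traffic.py | build_series
-- ===== SOURCE A (Python) =====
-- BIN_SECONDS = 10 * 60
--
-- DAY_SECONDS = 24 * 60 * 60
--
-- def categorize_call(origin_floor, destination_floor):
-- 	if origin_floor > 0 and destination_floor == 0:
-- 		return "outgoing"
-- 	if origin_floor == 0 and destination_floor != 0:
-- 		return "incoming"
-- 	if origin_floor != 0 and destination_floor != 0:
-- 		return "inter-floor"
-- 	return None
--
-- def build_series(calls):
-- 	num_bins = DAY_SECONDS // BIN_SECONDS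
-- 	outgoing_counts = [0] * num_bins
-- 	interfloor_counts = [0] * num_bins
-- 	incoming_counts = [0] * num_bins
--
-- 	for t, origin_floor, destination_floor in calls:
-- 		if t < 0 or t >= DAY_SECONDS:
-- 			continue
-- 		idx = t // BIN_SECONDS
-- 		category = categorize_call(origin_floor, destination_floor)
-- 		if category == "outgoing":
-- 			outgoing_counts[idx] += 1
-- 		elif category == "inter-floor":
-- 			interfloor_counts[idx] += 1
-- 		elif category == "incoming":
-- 			incoming_counts[idx] += 1
--
-- 	x_seconds = [i * BIN_SECONDS for i in range(num_bins)]
-- 	return x_seconds, outgoing_counts, interfloor_counts, incoming_counts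
-- ===== SOURCE B (Python) =====
-- BIN_SECONDS = 10 * 60
--
-- DAY_SECONDS = 24 * 60 * 60
--
-- def categorize_call(origin_floor, destination_floor):
-- 	if origin_floor > 0 and destination_floor == 0:
-- 		return "outgoing"
-- 	if origin_floor == 0 and destination_floor != 0:
-- 		return "incoming"
-- 	if origin_floor != 0 and destination_floor != 0:
-- 		return "inter-floor"
-- 	return None
--
-- def _bin_count(calls, category, i):
-- 	return sum(1 for t, o, d in calls
-- 	           if 0 <= t < DAY_SECONDS
-- 	           and t // BIN_SECONDS == i
-- 	           and categorize_call(o, d) == category)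
--
-- def build_series(calls):
-- 	num_bins = DAY_SECONDS // BIN_SECONDS
-- 	x_seconds = [i * BIN_SECONDS for i in range(num_bins)]
-- 	return (x_seconds,
-- 		[_bin_count(calls, "outgoing", i) for i in range(num_bins)],
-- 		[_bin_count(calls, "inter-floor", i) for i in range(num_bins)],
-- 		[_bin_count(calls, "incoming", i) for i in range(num_bins)])
-- ===== Notes on version B (the rewrite author's own statement) =====
-- stated objective: alternative
-- what changed: A does one call-major pass mutating three directly-indexed dense arrays; B has no accumulator at all: it is bin-major, computing each of the 144 bins per category as an independent count over the calls list (nested scans instead of a single accumulation pass).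
import Mathlib
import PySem

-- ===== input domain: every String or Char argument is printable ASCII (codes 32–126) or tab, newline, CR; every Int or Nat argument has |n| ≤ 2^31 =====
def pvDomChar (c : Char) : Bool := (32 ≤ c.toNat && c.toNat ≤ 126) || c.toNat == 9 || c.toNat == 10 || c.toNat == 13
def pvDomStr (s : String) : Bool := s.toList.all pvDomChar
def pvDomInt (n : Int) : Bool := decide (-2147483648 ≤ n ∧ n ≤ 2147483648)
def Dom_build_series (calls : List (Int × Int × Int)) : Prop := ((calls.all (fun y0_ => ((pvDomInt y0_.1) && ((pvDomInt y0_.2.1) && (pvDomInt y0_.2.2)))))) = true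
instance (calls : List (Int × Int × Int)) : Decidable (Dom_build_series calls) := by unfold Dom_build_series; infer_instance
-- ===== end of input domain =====

-- B replaces A's single accumulating pass over three dense arrays by a bin-major
-- computation: each bin/category count is an independent scan over the calls
-- (objective: alternative structure; no accumulator; costs O(n * num_bins)).


-- ===== PORT A =====
def categorize_call (origin_floor destination_floor : Int) : Option String :=
  if origin_floor > 0 ∧ destination_floor = 0 then some "outgoing"
  else if origin_floor = 0 ∧ destination_floor ≠ 0 then some "incoming"
  else if origin_floor ≠ 0 ∧ destination_floor ≠ 0 then some "inter-floor"
  else none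

-- loop body of A's for-loop, as a named helper
def stepA (st : List Int × List Int × List Int) (c : Int × Int × Int) :
    List Int × List Int × List Int :=
  let (outg, intf, inc) := st
  let (t, o, d) := c
  if t < 0 ∨ t ≥ 86400 then (outg, intf, inc)
  else
    let idx := PySem.Int.floordiv t 600
    let category := categorize_call o d
    if category = some "outgoing" then
      (PySem.List.pySetD outg idx (PySem.List.pyGetD outg idx 0 + 1), intf, inc)
    else if category = some "inter-floor" then
      (outg, PySem.List.pySetD intf idx (PySem.List.pyGetD intf idx 0 + 1), inc)
    else if category = some "incoming" then
      (outg, intf, PySem.List.pySetD inc idx (PySem.List.pyGetD inc idx 0 + 1))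
    else (outg, intf, inc)

def build_series (calls : List (Int × Int × Int)) : List Int × List Int × List Int × List Int :=
  let numBins := PySem.Int.floordiv 86400 600
  let st := calls.foldl stepA
    (List.replicate numBins.toNat 0, List.replicate numBins.toNat 0, List.replicate numBins.toNat 0)
  let x_seconds := (PySem.List.pyRange 0 numBins 1).map (fun i => i * 600)
  (x_seconds, st.1, st.2.1, st.2.2)

-- ===== PORT B =====
-- _bin_count: sum(1 for …) over the calls, ported as List.countP
def bin_count (calls : List (Int × Int × Int)) (category : String) (i : Int) : Int :=
  (calls.countP (fun c =>
    decide (0 ≤ c.1 ∧ c.1 < 86400 ∧ PySem.Int.floordiv c.1 600 = i ∧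
            categorize_call c.2.1 c.2.2 = some category)) : Int)

def build_series_alt (calls : List (Int × Int × Int)) : List Int × List Int × List Int × List Int :=
  let numBins := PySem.Int.floordiv 86400 600
  let rng := PySem.List.pyRange 0 numBins 1
  let x_seconds := rng.map (fun i => i * 600)
  (x_seconds,
   rng.map (fun i => bin_count calls "outgoing" i),
   rng.map (fun i => bin_count calls "inter-floor" i),
   rng.map (fun i => bin_count calls "incoming" i))

-- ===== PRECONDITION & SPEC =====
def Spec_build_series (calls : List (Int × Int × Int)) (out : List Int × List Int × List Int × List Int) : Prop := out = build_series_alt calls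
instance (calls : List (Int × Int × Int)) (out : List Int × List Int × List Int × List Int) : Decidable (Spec_build_series calls out) := by unfold Spec_build_series; infer_instance

-- ===== CLAIM (what is proved, stated in full; the proofs are below) =====
def Claim_equal_build_series : Prop := ∀ (calls : List (Int × Int × Int)), Dom_build_series calls → Spec_build_series calls (build_series calls)

-- ===== LEMMAS AND PROOFS =====

-- the Bool predicate of bin_count, abbreviated
def hitP (category : String) (i : Int) (c : Int × Int × Int) : Bool :=
  decide (0 ≤ c.1 ∧ c.1 < 86400 ∧ PySem.Int.floordiv c.1 600 = i ∧
          categorize_call c.2.1 c.2.2 = some category)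

theorem bin_count_eq (calls : List (Int × Int × Int)) (s : String) (i : Int) :
    bin_count calls s i = (calls.countP (hitP s i) : Int) := rfl

-- effect of A's in-place increment at idx on entry k
theorem setD_getD (xs : List Int) (idx : Int)
    (h0 : 0 ≤ idx) (h1 : idx < 144) (hlen : xs.length = 144) (k : Nat) (hk : k < 144) :
    (PySem.List.pySetD xs idx (PySem.List.pyGetD xs idx 0 + 1)).getD k 0
      = xs.getD k 0 + (if (k : Int) = idx then 1 else 0) := by
  have hidxlt : idx.toNat < xs.length := by omega
  have hvx : PySem.List.pyGetD xs idx 0 = xs.getD idx.toNat 0 := by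
    rw [PySem.List.pyGetD_eq_getElem xs 0 h0 (by push_cast [hlen]; omega)]
    simp [List.getD_eq_getElem?_getD, List.getElem?_eq_getElem hidxlt]
  rw [PySem.List.pySetD_of_nonneg xs _ h0]
  by_cases he : k = idx.toNat
  · subst he
    rw [if_pos (by omega)]
    rw [List.getD_eq_getElem?_getD, List.getElem?_set, if_pos rfl, if_pos hidxlt,
        Option.getD_some, hvx]
  · rw [if_neg (by omega)]
    rw [List.getD_eq_getElem?_getD, List.getElem?_set, if_neg (by omega),
        ← List.getD_eq_getElem?_getD]
    exact (add_zero _).symm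

-- entry-wise effect of one stepA on each of the three arrays
theorem stepA_getD (outg intf inc : List Int) (c : Int × Int × Int)
    (hl1 : outg.length = 144) (hl2 : intf.length = 144) (hl3 : inc.length = 144)
    (k : Nat) (hk : k < 144) :
    (stepA (outg, intf, inc) c).1.length = 144 ∧
    (stepA (outg, intf, inc) c).2.1.length = 144 ∧
    (stepA (outg, intf, inc) c).2.2.length = 144 ∧
    (stepA (outg, intf, inc) c).1.getD k 0
      = outg.getD k 0 + (if hitP "outgoing" (k : Int) c then 1 else 0) ∧
    (stepA (outg, intf, inc) c).2.1.getD k 0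
      = intf.getD k 0 + (if hitP "inter-floor" (k : Int) c then 1 else 0) ∧
    (stepA (outg, intf, inc) c).2.2.getD k 0
      = inc.getD k 0 + (if hitP "incoming" (k : Int) c then 1 else 0) := by
  obtain ⟨t, o, d⟩ := c
  by_cases hg : t < 0 ∨ t ≥ 86400
  · have hh : ∀ s : String, hitP s (k : Int) (t, o, d) = false := by
      intro s; simp only [hitP, decide_eq_false_iff_not]; rintro ⟨a, b, _⟩; omega
    simp only [stepA, if_pos hg, hh]
    exact ⟨hl1, hl2, hl3, by simp, by simp, by simp⟩
  · have ht0 : 0 ≤ t := by omega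
    have ht1 : t < 86400 := by omega
    have hidx0 : 0 ≤ PySem.Int.floordiv t 600 :=
      (PySem.Int.le_floordiv_iff_mul_le (by omega)).mpr (by omega)
    have hidx1 : PySem.Int.floordiv t 600 < 144 :=
      (PySem.Int.floordiv_lt_iff_lt_mul (by omega)).mpr (by omega)
    have hhit : ∀ s : String, categorize_call o d = some s →
        ∀ s' : String, (hitP s' (k : Int) (t, o, d)
          = (decide ((k : Int) = PySem.Int.floordiv t 600) && decide (s = s'))) := by
      intro s hs s'
      simp only [hitP, hs]
      by_cases he : (k : Int) = PySem.Int.floordiv t 600 <;>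
        by_cases he2 : s = s' <;> simp_all <;> omega
    have hmiss : categorize_call o d = none →
        ∀ s' : String, hitP s' (k : Int) (t, o, d) = false := by
      intro hn s'
      simp [hitP, hn]
    by_cases hA : o > 0 ∧ d = 0
    · have hcat : categorize_call o d = some "outgoing" := by simp [categorize_call, hA]
      simp only [stepA, if_neg hg, hcat, Option.some.injEq, String.reduceEq, reduceIte,
        hhit _ hcat]
      refine ⟨by rw [PySem.List.length_pySetD]; exact hl1, hl2, hl3, ?_, by simp, by simp⟩
      rw [setD_getD outg _ hidx0 hidx1 hl1 k hk]
      by_cases he : (k : Int) = PySem.Int.floordiv t 600 <;> simp [he]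
    · by_cases hB : o = 0 ∧ d ≠ 0
      · have hcat : categorize_call o d = some "incoming" := by simp [categorize_call, hB]
        simp only [stepA, if_neg hg, hcat, Option.some.injEq, String.reduceEq, reduceIte,
          hhit _ hcat]
        refine ⟨hl1, hl2, by rw [PySem.List.length_pySetD]; exact hl3, by simp, by simp, ?_⟩
        rw [setD_getD inc _ hidx0 hidx1 hl3 k hk]
        by_cases he : (k : Int) = PySem.Int.floordiv t 600 <;> simp [he]
      · by_cases hC : o ≠ 0 ∧ d ≠ 0
        · have hcat : categorize_call o d = some "inter-floor" := by
            simp only [categorize_call, if_neg hA, if_neg hB, if_pos hC]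
          simp only [stepA, if_neg hg, hcat, Option.some.injEq, String.reduceEq, reduceIte,
            hhit _ hcat]
          refine ⟨hl1, by rw [PySem.List.length_pySetD]; exact hl2, hl3, by simp, ?_, by simp⟩
          rw [setD_getD intf _ hidx0 hidx1 hl2 k hk]
          by_cases he : (k : Int) = PySem.Int.floordiv t 600 <;> simp [he]
        · have hcat : categorize_call o d = none := by
            simp only [categorize_call, if_neg hA, if_neg hB, if_neg hC]
          simp only [stepA, if_neg hg, hcat, reduceCtorEq, reduceIte, hmiss hcat]
          exact ⟨hl1, hl2, hl3, by simp, by simp, by simp⟩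

-- folding A's loop adds, entry-wise, the bin-major count of the folded calls
theorem foldA_getD (calls : List (Int × Int × Int)) (outg intf inc : List Int)
    (hl1 : outg.length = 144) (hl2 : intf.length = 144) (hl3 : inc.length = 144) :
    (calls.foldl stepA (outg, intf, inc)).1.length = 144 ∧
    (calls.foldl stepA (outg, intf, inc)).2.1.length = 144 ∧
    (calls.foldl stepA (outg, intf, inc)).2.2.length = 144 ∧
    ∀ k : Nat, k < 144 →
      (calls.foldl stepA (outg, intf, inc)).1.getD k 0
        = outg.getD k 0 + (calls.countP (hitP "outgoing" (k : Int)) : Int) ∧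
      (calls.foldl stepA (outg, intf, inc)).2.1.getD k 0
        = intf.getD k 0 + (calls.countP (hitP "inter-floor" (k : Int)) : Int) ∧
      (calls.foldl stepA (outg, intf, inc)).2.2.getD k 0
        = inc.getD k 0 + (calls.countP (hitP "incoming" (k : Int)) : Int) := by
  induction calls generalizing outg intf inc with
  | nil => exact ⟨hl1, hl2, hl3, fun k hk => by simp⟩
  | cons c cs ih =>
      have hs0 := fun (k : Nat) (hk : k < 144) => stepA_getD outg intf inc c hl1 hl2 hl3 k hk
      have hlen := stepA_getD outg intf inc c hl1 hl2 hl3 0 (by omega)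
      obtain ⟨i1, i2, i3, ipt⟩ := ih (stepA (outg, intf, inc) c).1
        (stepA (outg, intf, inc) c).2.1 (stepA (outg, intf, inc) c).2.2
        hlen.1 hlen.2.1 hlen.2.2.1
      refine ⟨by simpa using i1, by simpa using i2, by simpa using i3, ?_⟩
      intro k hk
      obtain ⟨p1, p2, p3⟩ := ipt k hk
      obtain ⟨_, _, _, q1, q2, q3⟩ := hs0 k hk
      simp only [Prod.mk.eta] at p1 p2 p3
      simp only [List.foldl_cons, List.countP_cons]
      refine ⟨?_, ?_, ?_⟩
      · rw [p1, q1]; by_cases h : hitP "outgoing" (k : Int) c <;> simp [h] <;> push_cast <;> ring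
      · rw [p2, q2]; by_cases h : hitP "inter-floor" (k : Int) c <;> simp [h] <;> push_cast <;> ring
      · rw [p3, q3]; by_cases h : hitP "incoming" (k : Int) c <;> simp [h] <;> push_cast <;> ring

theorem dense_eq (xs : List Int) (f : Int → Int) (hlen : xs.length = 144)
    (h : ∀ k : Nat, k < 144 → xs.getD k 0 = f (k : Int)) :
    xs = (PySem.List.pyRange 0 144 1).map f := by
  apply List.ext_getElem
  · simp [PySem.List.length_pyRange_one, hlen]
  · intro k hk hk'
    have hk144 : k < 144 := by simpa [hlen] using hk
    have := h k hk144
    rw [List.getD_eq_getElem xs 0 hk] at this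
    simp [PySem.List.getElem_pyRange_one, this]

theorem numBins_eq : PySem.Int.floordiv 86400 600 = 144 := by decide

-- ===== VERDICT (by name: the statement is the Claim_ definition above) =====
theorem build_series_spec : Claim_equal_build_series := by
  intro calls _
  unfold Spec_build_series build_series build_series_alt
  simp only [numBins_eq, Prod.mk.injEq]
  obtain ⟨h1, h2, h3, hpt⟩ := foldA_getD calls
    (List.replicate (Int.toNat 144) 0) (List.replicate (Int.toNat 144) 0)
    (List.replicate (Int.toNat 144) 0) (by simp) (by simp) (by simp)
  refine ⟨trivial, ?_, ?_, ?_⟩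
  · exact dense_eq _ _ h1 (fun k hk => by
      rw [(hpt k hk).1, List.getD_replicate _ (by omega), bin_count_eq]; ring)
  · exact dense_eq _ _ h2 (fun k hk => by
      rw [(hpt k hk).2.1, List.getD_replicate _ (by omega), bin_count_eq]; ring)
  · exact dense_eq _ _ h3 (fun k hk => by
      rw [(hpt k hk).2.2, List.getD_replicate _ (by omega), bin_count_eq]; ring)
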